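-- pv_equiv track=rewrite | github.com/Wutikorn/Ultrasound_Image_Subset_Selection | Keyframe_extractor.py | calculate_num_clusters
-- ===== SOURCE A (Python) =====
-- import math
--
-- def calculate_num_clusters(frame_numbers):
--     """
--     Calculates the number of clusters/keyframes for a given list of frame numbers.
--
--     Args:
--         frame_numbers: A list of integers representing frame numbers (assumed to be sorted).
--
--     Returns:
--         The total number of clusters/keyframes needed.
--     """
--     num_clusters = 1  # Start with 1 cluster
--     current_segment_length = 1
--
--     for i in range(1, len(frame_numbers)):
--         diff = frame_numbers[i] - frame_numbers[i - 1]
--         if diff > 20:  # New segment starts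
--             if current_segment_length > 40:
--                 num_clusters += math.ceil(current_segment_length * 0.01)
--             elif current_segment_length >= 2:  # Increment only if segment has at least 2 frames
--                 num_clusters += 1
--             elif current_segment_length == 1:
--                 num_clusters += 0.5
--             current_segment_length = 1
--         else:
--             current_segment_length += 1
--
--     # Handle the last segment
--     if current_segment_length > 40:
--         num_clusters += math.ceil(current_segment_length * 0.01)
--     elif current_segment_length >= 2:
--         num_clusters += 1
--
--     return int(num_clusters)
-- ===== SOURCE B (Python) =====
-- def calculate_num_clusters(frame_numbers):
--     # Pass 1: lengths of the closed-off (interior) segments; cur = final segment length.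
--     segs = []
--     cur = 1
--     for i in range(1, len(frame_numbers)):
--         if frame_numbers[i] - frame_numbers[i - 1] > 20:
--             segs.append(cur)
--             cur = 1
--         else:
--             cur += 1
--     # Pass 2: cluster count in integer half-units (2x the value) instead of floats.
--     total2 = 2
--     for L in segs:
--         if L > 40:
--             total2 += 2 * (-(-L // 100))
--         elif L >= 2:
--             total2 += 2
--         elif L == 1:
--             total2 += 1
--     if cur > 40:
--         total2 += 2 * (-(-cur // 100))
--     elif cur >= 2:
--         total2 += 2
--     return total2 // 2
-- ===== Notes on version B (the rewrite author's own statement) =====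
-- stated objective: alternative
-- what changed: B splits the work into two passes -- first collecting segment lengths from the >20 gaps, then scoring those lengths -- and replaces the float 0.5/int() accumulation with exact integer half-unit arithmetic (2x the count, floor-halved at the end) and ceil(L*0.01) with integer ceiling division -(-L//100).
import Mathlib
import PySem

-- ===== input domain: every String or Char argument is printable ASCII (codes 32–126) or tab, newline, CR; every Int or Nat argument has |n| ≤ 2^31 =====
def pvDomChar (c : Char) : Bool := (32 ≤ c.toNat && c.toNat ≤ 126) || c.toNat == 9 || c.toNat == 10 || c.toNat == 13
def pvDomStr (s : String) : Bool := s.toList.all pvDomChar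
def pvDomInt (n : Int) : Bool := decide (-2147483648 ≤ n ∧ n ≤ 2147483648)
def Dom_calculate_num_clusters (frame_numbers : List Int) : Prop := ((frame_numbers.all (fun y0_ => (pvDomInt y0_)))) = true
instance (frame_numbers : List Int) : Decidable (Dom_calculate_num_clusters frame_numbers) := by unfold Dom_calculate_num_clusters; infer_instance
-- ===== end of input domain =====

-- B re-decomposes A into two passes (collect segment lengths, then score them) with exact
-- integer half-unit arithmetic in place of A's float 0.5 accumulation; same O(n) cost.
-- A's float state is always an exact multiple of 0.5, so both ports carry it as the DOUBLED
-- integer 2*num_clusters; int() truncation of the (always ≥ 1) result is floor division by 2,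
-- and math.ceil(L*0.01) equals the integer ceiling -((-L)//100) for the segment lengths involved.

-- ===== PORT A =====
-- math.ceil(L * 0.01), exact as integer ceiling division for the list lengths involved
def pvCeil01 (L : Int) : Int := -(PySem.Int.floordiv (-L) 100)

-- one iteration of A's loop; state = (2*num_clusters, current_segment_length);
-- indices i and i-1 are always in range, so pyGetD's default is never used
def pvStepA (fns : List Int) (s : Int × Int) (i : Int) : Int × Int :=
  let diff := PySem.List.pyGetD fns i 0 - PySem.List.pyGetD fns (i - 1) 0
  if diff > 20 then
    (if s.2 > 40 then s.1 + 2 * pvCeil01 s.2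
     else if s.2 ≥ 2 then s.1 + 2
     else if s.2 = 1 then s.1 + 1
     else s.1, 1)
  else (s.1, s.2 + 1)

def calculate_num_clusters (frame_numbers : List Int) : Int :=
  let st := (PySem.List.pyRange 1 (frame_numbers.length : Int) 1).foldl (pvStepA frame_numbers) (2, 1)
  let num2 := if st.2 > 40 then st.1 + 2 * pvCeil01 st.2
              else if st.2 ≥ 2 then st.1 + 2
              else st.1
  PySem.Int.floordiv num2 2

-- ===== PORT B =====
-- pass 1: one iteration; state = (interior segment lengths so far, current length)
def pvStepB (fns : List Int) (s : List Int × Int) (i : Int) : List Int × Int :=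
  if PySem.List.pyGetD fns i 0 - PySem.List.pyGetD fns (i - 1) 0 > 20 then (s.1 ++ [s.2], 1)
  else (s.1, s.2 + 1)

-- pass 2: doubled score of one interior segment length
def pvW2 (L : Int) : Int :=
  if L > 40 then 2 * (-(PySem.Int.floordiv (-L) 100))
  else if L ≥ 2 then 2
  else if L = 1 then 1
  else 0

def calculate_num_clusters_alt (frame_numbers : List Int) : Int :=
  let p := (PySem.List.pyRange 1 (frame_numbers.length : Int) 1).foldl (pvStepB frame_numbers) ([], 1)
  let total2 := p.1.foldl (fun t L => t + pvW2 L) 2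
  let total2 := if p.2 > 40 then total2 + 2 * (-(PySem.Int.floordiv (-p.2) 100))
                else if p.2 ≥ 2 then total2 + 2
                else total2
  PySem.Int.floordiv total2 2

-- ===== PRECONDITION & SPEC =====
def Spec_calculate_num_clusters (frame_numbers : List Int) (out : Int) : Prop := out = calculate_num_clusters_alt frame_numbers
instance (frame_numbers : List Int) (out : Int) : Decidable (Spec_calculate_num_clusters frame_numbers out) := by unfold Spec_calculate_num_clusters; infer_instance

-- ===== CLAIM (what is proved, stated in full; the proofs are below) =====
def Claim_equal_calculate_num_clusters : Prop := ∀ (frame_numbers : List Int), Dom_calculate_num_clusters frame_numbers → Spec_calculate_num_clusters frame_numbers (calculate_num_clusters frame_numbers)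

-- ===== LEMMAS AND PROOFS =====

-- A's branch tower adds exactly the doubled interior score pvW2
theorem pvStepA_weight (num2 c : Int) :
    (if c > 40 then num2 + 2 * pvCeil01 c
     else if c ≥ 2 then num2 + 2
     else if c = 1 then num2 + 1
     else num2) = num2 + pvW2 c := by
  simp only [pvW2, pvCeil01]
  split_ifs <;> ring

-- B's first pass only appends: the accumulated list factors out front
theorem pvFoldB_append (fns : List Int) (is : List Int) (segs : List Int) (cur : Int) :
    is.foldl (pvStepB fns) (segs, cur) =
      (segs ++ (is.foldl (pvStepB fns) ([], cur)).1, (is.foldl (pvStepB fns) ([], cur)).2) := by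
  induction is generalizing segs cur with
  | nil => simp
  | cons i is ih =>
    simp only [List.foldl_cons, pvStepB]
    split_ifs with h
    · rw [ih (segs ++ [cur]) 1]
      simp only [List.nil_append]
      rw [ih [cur] 1]
      simp
    · exact ih segs (cur + 1)

-- A's fold is "num2 + doubled score of B's interior segments", with the same current length
theorem pvFoldAB (fns : List Int) (is : List Int) (num2 cur : Int) :
    is.foldl (pvStepA fns) (num2, cur) =
      (num2 + (((is.foldl (pvStepB fns) ([], cur)).1).map pvW2).sum,
       (is.foldl (pvStepB fns) ([], cur)).2) := by
  induction is generalizing num2 cur with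
  | nil => simp
  | cons i is ih =>
    simp only [List.foldl_cons, pvStepA, pvStepB]
    by_cases h : PySem.List.pyGetD fns i 0 - PySem.List.pyGetD fns (i - 1) 0 > 20
    · rw [if_pos h, if_pos h, pvStepA_weight, ih]
      simp only [List.nil_append]
      rw [pvFoldB_append fns is [cur] 1]
      exact Prod.ext (by simp; ring) rfl
    · rw [if_neg h, if_neg h]
      exact ih num2 (cur + 1)

-- ===== VERDICT (by name: the statement is the Claim_ definition above) =====
theorem calculate_num_clusters_spec : Claim_equal_calculate_num_clusters := by
  intro fns _
  show _ = _
  simp only [calculate_num_clusters, calculate_num_clusters_alt]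
  rw [pvFoldAB, PySem.List.foldl_add _ pvW2]
  dsimp only
  simp only [pvCeil01]
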